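-- pv_equiv track=rewrite | github.com/Cracroule/connect4 | minimax_player.py | naive_score_board
-- ===== SOURCE A (Python) =====
-- def naive_score_board(board, p1_symbol, p2_symbol):
--     n_large, n_high = len(board), len(board[0])
--     score = 0
--     for x_i in range(n_large):
--         for y_j in range(n_high):
--             if board[x_i][y_j] == p1_symbol:
--                 score += 3 - abs(x_i - 3) + 2 - abs(y_j - 2)
--             elif board[x_i][y_j] == p2_symbol:
--                 score -= 3 - abs(x_i - 3) + 2 - abs(y_j - 2)
--     return score
-- ===== SOURCE B (Python) =====
-- def naive_score_board(board, p1_symbol, p2_symbol):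
--     h = len(board[0])
--
--     def sign(c):
--         return 1 if c == p1_symbol else (-1 if c == p2_symbol else 0)
--
--     net_rows = [sum(sign(row[y]) for y in range(h)) for row in board]
--     net_cols = [sum(sign(row[y]) for row in board) for y in range(h)]
--     row_score = sum((3 - abs(x - 3)) * n for x, n in enumerate(net_rows))
--     col_score = sum((2 - abs(y - 2)) * n for y, n in enumerate(net_cols))
--     return row_score + col_score
-- ===== Notes on version B (the rewrite author's own statement) =====
-- stated objective: alternative
-- what changed: Instead of A's nested index loops adding the combined weight per cell, B computes net sign counts per row and per column and returns the weighted row-marginal sum plus the weighted column-marginal sum.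
import Mathlib
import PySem

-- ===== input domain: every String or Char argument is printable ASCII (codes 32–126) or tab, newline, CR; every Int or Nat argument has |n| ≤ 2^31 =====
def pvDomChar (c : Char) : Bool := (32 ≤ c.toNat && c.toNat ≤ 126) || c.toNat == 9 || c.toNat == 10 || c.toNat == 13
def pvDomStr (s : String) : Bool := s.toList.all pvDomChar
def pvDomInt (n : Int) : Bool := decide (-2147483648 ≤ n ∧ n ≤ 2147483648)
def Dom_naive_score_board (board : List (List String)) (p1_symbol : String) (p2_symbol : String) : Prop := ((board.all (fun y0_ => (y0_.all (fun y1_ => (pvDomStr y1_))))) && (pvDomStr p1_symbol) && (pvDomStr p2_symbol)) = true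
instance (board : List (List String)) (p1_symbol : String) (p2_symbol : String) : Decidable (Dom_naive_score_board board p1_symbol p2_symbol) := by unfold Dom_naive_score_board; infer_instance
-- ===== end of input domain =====

-- B splits the positional score into row-marginal and column-marginal weighted sums
-- (net sign per row / per column) instead of A's single per-cell accumulation;
-- objective: alternative decomposition, same cost.


-- ===== PORT A =====
-- literal port of A: nested index loops accumulating one score.
-- indexing via pyGetD is exact under Pre_ (all indices in range there; out of range Python raises).
def naive_score_board (board : List (List String)) (p1_symbol : String) (p2_symbol : String) : Int :=
  let n_large : Int := board.length
  let n_high : Int := (PySem.List.pyGetD board 0 []).length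
  (PySem.List.pyRange 0 n_large 1).foldl (fun score x_i =>
    (PySem.List.pyRange 0 n_high 1).foldl (fun score y_j =>
      if PySem.List.pyGetD (PySem.List.pyGetD board x_i []) y_j "" = p1_symbol then
        score + (3 - |x_i - 3| + (2 - |y_j - 2|))
      else if PySem.List.pyGetD (PySem.List.pyGetD board x_i []) y_j "" = p2_symbol then
        score - (3 - |x_i - 3| + (2 - |y_j - 2|))
      else score) score) 0

-- ===== PORT B =====
-- port of Source B: per-row / per-column net signs, then two weighted marginal sums.
-- row[y] → row.getD y "" is exact under Pre_ (0 ≤ y < row.length there; shorter rows raise in Python).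
def nsbSign (p1_symbol p2_symbol c : String) : Int :=
  if c = p1_symbol then 1 else if c = p2_symbol then -1 else 0

def naive_score_board_alt (board : List (List String)) (p1_symbol : String) (p2_symbol : String) : Int :=
  let h := (PySem.List.pyGetD board 0 []).length
  let net_rows := board.map (fun row =>
    ((List.range h).map (fun y => nsbSign p1_symbol p2_symbol (row.getD y ""))).sum)
  let net_cols := (List.range h).map (fun y =>
    (board.map (fun row => nsbSign p1_symbol p2_symbol (row.getD y ""))).sum)
  let row_score := ((PySem.List.enumerate net_rows).map
    (fun p => (3 - |p.1 - 3|) * p.2)).sum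
  let col_score := ((PySem.List.enumerate net_cols).map
    (fun p => (2 - |p.1 - 2|) * p.2)).sum
  row_score + col_score

-- ===== PRECONDITION & SPEC =====
-- Pre_ excludes exactly the inputs where Python A raises IndexError (B raises identically
-- there): an empty board (len(board[0])) and boards with a row shorter than board[0].
def Pre_naive_score_board (board : List (List String)) (p1_symbol : String) (p2_symbol : String) : Prop :=
  board ≠ [] ∧ ∀ row ∈ board, board.headI.length ≤ row.length
instance (board : List (List String)) (p1_symbol : String) (p2_symbol : String) : Decidable (Pre_naive_score_board board p1_symbol p2_symbol) := by unfold Pre_naive_score_board; infer_instance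

def pvWitness_naive_score_board : List (List String) × String × String :=
  ([["X", "O"], ["O", "X"]], "X", "O")

def Spec_naive_score_board (board : List (List String)) (p1_symbol : String) (p2_symbol : String) (out : Int) : Prop := out = naive_score_board_alt board p1_symbol p2_symbol
instance (board : List (List String)) (p1_symbol : String) (p2_symbol : String) (out : Int) : Decidable (Spec_naive_score_board board p1_symbol p2_symbol out) := by unfold Spec_naive_score_board; infer_instance

-- ===== CLAIM (what is proved, stated in full; the proofs are below) =====
def Claim_equal_naive_score_board : Prop := ∀ (board : List (List String)) (p1_symbol : String) (p2_symbol : String), Dom_naive_score_board board p1_symbol p2_symbol → Pre_naive_score_board board p1_symbol p2_symbol → Spec_naive_score_board board p1_symbol p2_symbol (naive_score_board board p1_symbol p2_symbol)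

-- ===== LEMMAS AND PROOFS =====

-- A's inner loop over one row index, as a Finset sum
theorem nsb_inner (board : List (List String)) (p1 p2 : String) (h : Nat) (x_i : Int) (score : Int) :
    (PySem.List.pyRange 0 (h : Int) 1).foldl (fun score y_j =>
      if PySem.List.pyGetD (PySem.List.pyGetD board x_i []) y_j "" = p1 then
        score + (3 - |x_i - 3| + (2 - |y_j - 2|))
      else if PySem.List.pyGetD (PySem.List.pyGetD board x_i []) y_j "" = p2 then
        score - (3 - |x_i - 3| + (2 - |y_j - 2|))
      else score) score
    = score + ∑ y ∈ Finset.range h,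
        nsbSign p1 p2 ((PySem.List.pyGetD board x_i []).getD y "") * ((3 - |x_i - 3|) + (2 - |(y : Int) - 2|)) := by
  rw [PySem.List.pyRange_zero_natCast, List.foldl_map]
  rw [PySem.List.foldl_congr_mem _ _ (fun acc (y : Nat) => acc +
      nsbSign p1 p2 ((PySem.List.pyGetD board x_i []).getD y "") * ((3 - |x_i - 3|) + (2 - |(y : Int) - 2|))) score ?_]
  · rw [PySem.List.foldl_add]
    rfl
  · intro acc y hy
    simp only [nsbSign, PySem.List.pyGetD_natCast]
    split_ifs <;> ring

-- A as a double Finset sum of sign × (row weight + column weight)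
theorem nsb_A_eq (board : List (List String)) (p1 p2 : String) :
    naive_score_board board p1 p2
    = ∑ x ∈ Finset.range board.length, ∑ y ∈ Finset.range (PySem.List.pyGetD board 0 []).length,
        nsbSign p1 p2 ((board.getD x []).getD y "") * ((3 - |(x : Int) - 3|) + (2 - |(y : Int) - 2|)) := by
  show (PySem.List.pyRange 0 (board.length : Int) 1).foldl _ 0 = _
  rw [PySem.List.pyRange_zero_natCast board.length, List.foldl_map]
  rw [PySem.List.foldl_congr_mem _ _ (fun score (x : Nat) => score +
      ∑ y ∈ Finset.range (PySem.List.pyGetD board 0 []).length,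
        nsbSign p1 p2 ((board.getD x []).getD y "") * ((3 - |(x : Int) - 3|) + (2 - |(y : Int) - 2|))) 0 ?_]
  · rw [PySem.List.foldl_add, zero_add]
    rfl
  · intro acc x hx
    rw [nsb_inner]
    simp [PySem.List.pyGetD_natCast]

-- a list-map sum is the Finset.range sum of its entries
theorem nsb_map_sum_eq {α : Type} (xs : List α) (d : α) (f : α → Int) :
    (xs.map f).sum = ∑ x ∈ Finset.range xs.length, f (xs.getD x d) := by
  induction xs with
  | nil => simp
  | cons a t ih =>
      simp [Finset.sum_range_succ', ih, add_comm]

-- a sum over List.range is the Finset.range sum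
theorem nsb_range_sum (n : Nat) (g : Nat → Int) :
    ((List.range n).map g).sum = ∑ x ∈ Finset.range n, g x := rfl

-- an enumerated weighted sum
theorem nsb_enum_sum (xs : List Int) (w : Int → Int) :
    ((PySem.List.enumerate xs).map (fun p => w p.1 * p.2)).sum
    = ∑ x ∈ Finset.range xs.length, w x * xs.getD x 0 := by
  rw [PySem.List.enumerate_eq_map_pyRange xs 0]
  rw [show PySem.List.len xs = (xs.length : Int) from rfl]
  rw [PySem.List.pyRange_zero_natCast, List.map_map, List.map_map, nsb_range_sum]
  apply Finset.sum_congr rfl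
  intro x hx
  simp [PySem.List.pyGetD_natCast, Function.comp]

-- B as the sum of the two weighted marginals
theorem nsb_B_eq (board : List (List String)) (p1 p2 : String) :
    naive_score_board_alt board p1 p2
    = (∑ x ∈ Finset.range board.length, (3 - |(x : Int) - 3|) *
        ∑ y ∈ Finset.range (PySem.List.pyGetD board 0 []).length, nsbSign p1 p2 ((board.getD x []).getD y ""))
      + (∑ y ∈ Finset.range (PySem.List.pyGetD board 0 []).length, (2 - |(y : Int) - 2|) *
        ∑ x ∈ Finset.range board.length, nsbSign p1 p2 ((board.getD x []).getD y "")) := by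
  simp only [naive_score_board_alt]
  rw [nsb_enum_sum _ (fun t => 3 - |t - 3|), nsb_enum_sum _ (fun t => 2 - |t - 2|)]
  simp only [List.length_map, List.length_range]
  congr 1
  · apply Finset.sum_congr rfl
    intro x hx
    simp only [Finset.mem_range] at hx
    congr 1
    rw [List.getD_eq_getElem?_getD, List.getElem?_map, List.getElem?_eq_getElem hx]
    simp [nsb_map_sum_eq (List.range _) 0, List.getD_eq_getElem?_getD]
    apply Finset.sum_congr rfl
    intro y hy
    simp only [Finset.mem_range] at hy
    simp [hy, List.getElem?_eq_getElem hx]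
  · apply Finset.sum_congr rfl
    intro y hy
    simp only [Finset.mem_range] at hy
    congr 1
    rw [List.getD_eq_getElem?_getD, List.getElem?_map, List.getElem?_eq_getElem (by simpa using hy)]
    simp [nsb_map_sum_eq board []]

-- the two decompositions agree (distribute and exchange the double sum)
theorem nsb_main (board : List (List String)) (p1 p2 : String) :
    naive_score_board board p1 p2 = naive_score_board_alt board p1 p2 := by
  rw [nsb_A_eq, nsb_B_eq]
  simp_rw [mul_add, Finset.sum_add_distrib, Finset.mul_sum]
  congr 1
  · exact Finset.sum_congr rfl fun x _ => Finset.sum_congr rfl fun y _ => mul_comm _ _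
  · rw [Finset.sum_comm]
    exact Finset.sum_congr rfl fun y _ => Finset.sum_congr rfl fun x _ => mul_comm _ _

-- ===== VERDICT (by name: the statement is the Claim_ definition above) =====
theorem naive_score_board_spec : Claim_equal_naive_score_board := by
  intro board p1 p2 _ _
  exact nsb_main board p1 p2
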